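-- pv_equiv track=rewrite | github.com/dadwadw233/CityLayout | scripts/osm/data_split.py | escape_path
-- ===== SOURCE A (Python) =====
-- def escape_path(path):
--     # 定义需要转义的字符及其转义后的形式
--     escape_chars = {
--         " ": "\\ ",  # 空格
--         "(": "\\(",  # 左括号
--         ")": "\\)",  # 右括号
--         "&": "\\&",  # 和号
--         "'": "\\'",  # 单引号
--         '"': '\\"',  # 双引号
--         "!": "\\!",  # 感叹号
--         "@": "\\@",  # At
--         "#": "\\#",  # 井号
--         "$": "\\$",  # 美元符
--         "%": "\\%",  # 百分号
--         "^": "\\^",  # 脱字符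
--         "*": "\\*",  # 星号
--         "=": "\\=",  # 等号
--         "+": "\\+",  # 加号
--         "|": "\\|",  # 竖线
--         "{": "\\{",  # 左花括号
--         "}": "\\}",  # 右花括号
--         "[": "\\[",  # 左中括号
--         "]": "\\]",  # 右中括号
--         "\\": "\\\\",  # 反斜杠
--         ":": "\\:",  # 冒号
--         ";": "\\;",  # 分号
--         "<": "\\<",  # 小于号
--         ">": "\\>",  # 大于号
--         "?": "\\?",  # 问号
--         ",": "\\,",  # 逗号
--         ".": "\\.",  # 英文句号
--         "`": "\\`",  # 重音符
--         "~": "\\~",  # 波浪号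
--     }
--
--     # 对每个需要转义的字符进行替换
--     for char, escaped_char in escape_chars.items():
--         path = path.replace(char, '-')
--
--     return path
-- ===== SOURCE B (Python) =====
-- # One pass over the string with a precomputed set of special characters
-- # instead of A's 30 full-string replace passes (alternative structure).
-- SPECIAL_CHARS = frozenset(" ()&'\"!@#$%^*=+|{}[]\\:;<>?,.`~")
--
--
-- def escape_path(path):
--     return ''.join('-' if c in SPECIAL_CHARS else c for c in path)
-- ===== Notes on version B (the rewrite author's own statement) =====
-- stated objective: alternative
-- what changed: B precomputes the set of special characters once and makes a single pass over the string, emitting a dash for a special character and the character itself otherwise, instead of A's 30 successive full-string str.replace passes.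
import Mathlib
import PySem

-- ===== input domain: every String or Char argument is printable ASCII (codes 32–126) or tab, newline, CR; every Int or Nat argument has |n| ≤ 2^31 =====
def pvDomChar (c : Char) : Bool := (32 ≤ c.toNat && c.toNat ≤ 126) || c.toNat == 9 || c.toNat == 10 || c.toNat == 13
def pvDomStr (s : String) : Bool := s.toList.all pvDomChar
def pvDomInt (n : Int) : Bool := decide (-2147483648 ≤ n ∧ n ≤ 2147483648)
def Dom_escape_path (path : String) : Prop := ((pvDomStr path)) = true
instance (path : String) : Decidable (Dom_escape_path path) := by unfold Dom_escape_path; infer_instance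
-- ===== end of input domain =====

-- B replaces A's 30 successive full-string replace passes by one pass over the
-- string with a precomputed set of special characters; same return value.

-- ===== PORT A =====
-- the dict literal of A, in insertion order (keys distinct, so .items() is exactly this list)
def pvEscapePairs : List (String × String) :=
  [(" ", "\\ "), ("(", "\\("), (")", "\\)"), ("&", "\\&"), ("'", "\\'"),
   ("\"", "\\\""), ("!", "\\!"), ("@", "\\@"), ("#", "\\#"), ("$", "\\$"),
   ("%", "\\%"), ("^", "\\^"), ("*", "\\*"), ("=", "\\="), ("+", "\\+"),
   ("|", "\\|"), ("{", "\\{"), ("}", "\\}"), ("[", "\\["), ("]", "\\]"),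
   ("\\", "\\\\"), (":", "\\:"), (";", "\\;"), ("<", "\\<"), (">", "\\>"),
   ("?", "\\?"), (",", "\\,"), (".", "\\."), ("`", "\\`"), ("~", "\\~")]

def escape_path (path : String) : String :=
  pvEscapePairs.foldl (fun p kv => PySem.Str.replace p kv.1 "-") path

-- ===== PORT B =====
def pvSpecials : PySem.Set Char :=
  PySem.Set.ofList " ()&'\"!@#$%^*=+|{}[]\\:;<>?,.`~".toList

def escape_path_alt (path : String) : String :=
  String.ofList (path.toList.map (fun c => if PySem.Set.contains pvSpecials c then '-' else c))

-- ===== PRECONDITION & SPEC =====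
def Spec_escape_path (path : String) (out : String) : Prop := out = escape_path_alt path
instance (path : String) (out : String) : Decidable (Spec_escape_path path out) := by unfold Spec_escape_path; infer_instance

-- ===== CLAIM (what is proved, stated in full; the proofs are below) =====
def Claim_equal_escape_path : Prop := ∀ (path : String), Dom_escape_path path → Spec_escape_path path (escape_path path)

-- ===== LEMMAS AND PROOFS =====

-- replace with a single-char pattern and single-char replacement is a pointwise map
lemma replace_go_single (c d : Char) (l : List Char) (fuel : Nat) (acc : List Char)
    (h : l.length ≤ fuel) :
    PySem.Chars.replace.go [c] [d] fuel l acc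
      = acc.reverse ++ l.map (fun ch => if ch = c then d else ch) := by
  induction l generalizing fuel acc with
  | nil =>
    cases fuel <;> simp [PySem.Chars.replace.go]
  | cons x t ih =>
    cases fuel with
    | zero => simp at h
    | succ n =>
      simp only [PySem.Chars.replace.go]
      by_cases hx : x = c
      · subst hx
        simp only [List.isPrefixOf, BEq.rfl, Bool.true_and, if_pos]
        rw [show List.drop [x].length (x :: t) = t from rfl, ih]
        · simp
        · simpa using Nat.le_of_succ_le_succ h
      · have : List.isPrefixOf [c] (x :: t) = false := by
          simp [List.isPrefixOf, Ne.symm hx]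
        rw [this]
        simp only [Bool.false_eq_true, if_false]
        rw [ih]
        · simp [hx]
        · simpa using Nat.le_of_succ_le_succ h

lemma replace_single (s : List Char) (c d : Char) :
    PySem.Chars.replace s [c] [d] = s.map (fun ch => if ch = c then d else ch) := by
  simp only [PySem.Chars.replace, List.isEmpty_cons, Bool.false_eq_true, if_false]
  simpa using replace_go_single c d s s.length [] le_rfl

-- A's foldl of replaces, pushed down to lists of chars
lemma foldl_replace_toList (pairs : List (String × String)) (s : String) :
    (pairs.foldl (fun p kv => PySem.Str.replace p kv.1 "-") s).toList
      = (pairs.map (fun kv => kv.1.toList)).foldl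
          (fun l k => PySem.Chars.replace l k ['-']) s.toList := by
  induction pairs generalizing s with
  | nil => rfl
  | cons kv t ih =>
    simp only [List.foldl_cons, List.map_cons, ih, PySem.Str.toList_replace]
    rfl

-- a chain of single-char replaces is one map of the folded pointwise substitution
lemma chain_replace (keys : List Char) (s : List Char) :
    (keys.map (fun c => [c])).foldl (fun l k => PySem.Chars.replace l k ['-']) s
      = s.map (fun ch => keys.foldl (fun x c => if x = c then '-' else x) ch) := by
  induction keys generalizing s with
  | nil => simp
  | cons k t ih =>
    simp only [List.map_cons, List.foldl_cons, replace_single, ih, List.map_map]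
    rfl

-- the pointwise substitution chain is a membership test, since '-' is never a key
lemma foldl_subst (keys : List Char) (hd : '-' ∉ keys) (ch : Char) :
    keys.foldl (fun x c => if x = c then '-' else x) ch
      = if ch ∈ keys then '-' else ch := by
  induction keys generalizing ch with
  | nil => simp
  | cons k t ih =>
    have hdt : '-' ∉ t := fun h => hd (List.mem_cons_of_mem _ h)
    simp only [List.foldl_cons]
    by_cases hk : ch = k
    · subst hk
      rw [if_pos rfl, ih hdt '-', if_pos (List.mem_cons_self ..)]
      simp
    · rw [if_neg hk, ih hdt ch]
      simp [List.mem_cons, hk]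

-- ===== VERDICT (by name: the statement is the Claim_ definition above) =====
theorem escape_path_spec : Claim_equal_escape_path := by
  intro path _
  unfold Spec_escape_path
  have hkeys : pvEscapePairs.map (fun kv => kv.1.toList)
      = (" ()&'\"!@#$%^*=+|{}[]\\:;<>?,.`~".toList).map (fun c => [c]) := by decide
  have hset : pvSpecials = " ()&'\"!@#$%^*=+|{}[]\\:;<>?,.`~".toList := by decide
  have hnd : '-' ∉ " ()&'\"!@#$%^*=+|{}[]\\:;<>?,.`~".toList := by decide
  have htl : (escape_path path).toList = (escape_path_alt path).toList := by
    rw [escape_path, foldl_replace_toList, hkeys, chain_replace]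
    show _ = (escape_path_alt path).toList
    rw [escape_path_alt]
    simp only [String.toList_ofList]
    apply List.map_congr_left
    intro ch _
    rw [foldl_subst _ hnd ch, hset]
    simp [PySem.Set.contains]
  calc escape_path path = String.ofList (escape_path path).toList := String.ofList_toList.symm
    _ = String.ofList (escape_path_alt path).toList := by rw [htl]
    _ = escape_path_alt path := String.ofList_toList
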